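-- pv_equiv track=rewrite | github.com/AlexanderBedrosyan/Programming-Fundamentals-with-Python | Regular Expressions - More Exercises/star_enigma_1.py | modify_dict
-- ===== SOURCE A (Python) =====
-- def modify_dict(dict, code_list):
--     value = ""
--     key = ""
--     for i in range(len(code_list)):
--         if code_list[i] == "@":
--             index = code_list.index(code_list[i])
--             value = code_list[index + 1]
--         if code_list[i] == "!":
--             index = code_list.index(code_list[i])
--             if code_list[index + 1] == "A":
--                 key = "Attacked"
--                 break
--             else:
--                 key = "Destroyed"
--                 break
--     if key not in dict:
--         dict[key] = []
--     dict[key].append(value)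
--     return dict
-- ===== SOURCE B (Python) =====
-- def modify_dict(dict, code_list):
--     p = code_list.index("!") if "!" in code_list else len(code_list)
--     prefix = code_list[:p]
--     value = code_list[prefix.index("@") + 1] if "@" in prefix else ""
--     key = ""
--     if p < len(code_list):
--         key = "Attacked" if code_list[p + 1] == "A" else "Destroyed"
--     dict.setdefault(key, []).append(value)
--     return dict
-- ===== Notes on version B (the rewrite author's own statement) =====
-- stated objective: simpler
-- what changed: B eliminates A's index loop with break entirely: it locates the first '!' once, slices the prefix before it, reads the value after the first '@' of that prefix and the key letter after the '!' by direct indexing, and uses dict.setdefault instead of the contains-then-insert pair.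
import Mathlib
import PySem

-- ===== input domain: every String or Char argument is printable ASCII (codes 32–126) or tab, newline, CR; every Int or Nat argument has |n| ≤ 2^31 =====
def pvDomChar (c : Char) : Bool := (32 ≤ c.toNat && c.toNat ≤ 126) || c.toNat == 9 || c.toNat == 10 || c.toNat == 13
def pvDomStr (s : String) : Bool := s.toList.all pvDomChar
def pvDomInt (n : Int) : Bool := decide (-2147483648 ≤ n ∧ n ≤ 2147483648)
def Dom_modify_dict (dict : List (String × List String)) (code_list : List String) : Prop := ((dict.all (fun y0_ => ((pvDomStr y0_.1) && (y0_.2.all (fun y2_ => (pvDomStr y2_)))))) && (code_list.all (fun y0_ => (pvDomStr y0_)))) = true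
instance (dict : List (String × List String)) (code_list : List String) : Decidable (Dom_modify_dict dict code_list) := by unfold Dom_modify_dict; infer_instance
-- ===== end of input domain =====

-- B replaces A's scanning loop by a loop-free first-index/slice computation (simpler);
-- in Python both A and B mutate the caller's dict in place the same way; the equivalence
-- proved here is about the RETURN value.

-- ===== PORT A =====
-- the for-loop of A: state (value, key); returning from inside the loop models `break`
def pvLoopA (code_list : List String) : List Int → String → String → String × String
  | [], value, key => (value, key)
  | i :: rest, value, key =>
    let x := (PySem.List.pyGet? code_list i).getD ""
    let value1 := if x = "@" then
        match PySem.List.index? code_list x with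
        | some idx => (PySem.List.pyGet? code_list ((idx : Int) + 1)).getD ""
        | none => value
      else value
    if x = "!" then
      match PySem.List.index? code_list x with
      | some idx =>
        if (PySem.List.pyGet? code_list ((idx : Int) + 1)).getD "" = "A"
        then (value1, "Attacked") else (value1, "Destroyed")
      | none => (value1, key)
    else pvLoopA code_list rest value1 key

def modify_dict (dict : List (String × List String)) (code_list : List String) : List (String × List String) :=
  let vk := pvLoopA code_list (PySem.List.pyRange 0 (code_list.length : Int) 1) "" ""
  let value := vk.1
  let key := vk.2
  let d := PySem.Dict.mk dict
  let d := if d.contains key then d else d.insert key []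
  (d.modify key [] (fun l => l ++ [value])).items

-- ===== PORT B =====
def modify_dict_alt (dict : List (String × List String)) (code_list : List String) : List (String × List String) :=
  let p : Int := match PySem.List.index? code_list "!" with
    | some q => (q : Int)
    | none => (code_list.length : Int)
  let pref := PySem.List.slice code_list none (some p)
  let value := if "@" ∈ pref then
      (PySem.List.pyGet? code_list (((PySem.List.index? pref "@").getD 0 : Int) + 1)).getD ""
    else ""
  let key := if p < (code_list.length : Int) then
      (if (PySem.List.pyGet? code_list (p + 1)).getD "" = "A" then "Attacked" else "Destroyed")
    else ""
  (((PySem.Dict.mk dict).setdefault key []).modify key [] (fun l => l ++ [value])).items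

-- first '@' of a prefix of cl is the first '@' of cl

-- ===== PRECONDITION & SPEC =====
-- Pre_ excludes exactly the inputs where Python A raises IndexError: a first '!' in last
-- position, or (with no '!') a first '@' in last position. (Python B raises there too.)
def Pre_modify_dict (dict : List (String × List String)) (code_list : List String) : Prop :=
  (match PySem.List.index? code_list "!" with
   | some q => decide (q + 1 < code_list.length)
   | none => match PySem.List.index? code_list "@" with
     | some p => decide (p + 1 < code_list.length)
     | none => true) = true
instance (dict : List (String × List String)) (code_list : List String) : Decidable (Pre_modify_dict dict code_list) := by unfold Pre_modify_dict; infer_instance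

def pvWitness_modify_dict : (List (String × List String)) × List String :=
  ([("Attacked", ["z"])], ["@", "x", "!", "A"])

def Spec_modify_dict (dict : List (String × List String)) (code_list : List String) (out : List (String × List String)) : Prop := out = modify_dict_alt dict code_list
instance (dict : List (String × List String)) (code_list : List String) (out : List (String × List String)) : Decidable (Spec_modify_dict dict code_list out) := by unfold Spec_modify_dict; infer_instance

-- ===== CLAIM (what is proved, stated in full; the proofs are below) =====
def Claim_equal_modify_dict : Prop := ∀ (dict : List (String × List String)) (code_list : List String), Dom_modify_dict dict code_list → Pre_modify_dict dict code_list → Spec_modify_dict dict code_list (modify_dict dict code_list)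

-- ===== LEMMAS AND PROOFS =====

-- value after the first '@' of cl (as A computes it); "" if no '@'
def pvValA (cl : List String) : String :=
  match PySem.List.index? cl "@" with
  | some p => (PySem.List.pyGet? cl ((p : Int) + 1)).getD ""
  | none => ""

-- key from the element after the first '!' of cl (as A computes it); "" if no '!'
def pvKeyA (cl : List String) : String :=
  match PySem.List.index? cl "!" with
  | some q => if (PySem.List.pyGet? cl ((q : Int) + 1)).getD "" = "A" then "Attacked" else "Destroyed"
  | none => ""

-- characterisation of A's loop, started at index i with state (v, k)
theorem pvLoopA_char (cl : List String) (i : Nat) (v k : String) (hi : i ≤ cl.length) :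
    pvLoopA cl (PySem.List.pyRange (i : Int) (cl.length : Int) 1) v k =
      (match PySem.List.index? (cl.drop i) "!" with
       | some r => (if "@" ∈ (cl.drop i).take r then pvValA cl else v, pvKeyA cl)
       | none => (if "@" ∈ cl.drop i then pvValA cl else v, k)) := by
  induction hn : cl.length - i generalizing i v k with
  | zero =>
    have : i = cl.length := by omega
    subst this
    rw [PySem.List.pyRange_one_eq_nil (by omega)]
    simp [pvLoopA]
  | succ m ih =>
    have hlt : i < cl.length := by omega
    rw [PySem.List.pyRange_one_cons (by exact_mod_cast hlt)]
    have hx : (PySem.List.pyGet? cl (i : Int)).getD "" = cl[i] := by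
      rw [PySem.List.pyGet?_eq_some_getElem cl (by omega) (by exact_mod_cast hlt)]
      simp
    have hdrop : cl.drop i = cl[i] :: cl.drop (i + 1) := List.drop_eq_getElem_cons hlt
    have hstep : ((i : Int) + 1) = ((i + 1 : Nat) : Int) := by push_cast; ring
    by_cases hbang : cl[i] = "!"
    · -- the loop breaks at this first '!'
      have hmem : "!" ∈ cl := hbang ▸ cl.getElem_mem hlt
      obtain ⟨q, hq⟩ := Option.isSome_iff_exists.1 ((PySem.List.index?_isSome_iff cl "!").2 hmem)
      simp only [pvLoopA, hx, hbang, hq, hdrop, PySem.List.index?_cons_self, pvKeyA]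
      simp only [reduceIte]
      split <;> rfl
    · by_cases hat : cl[i] = "@"
      · have hmem : "@" ∈ cl := hat ▸ cl.getElem_mem hlt
        obtain ⟨p, hp⟩ := Option.isSome_iff_exists.1 ((PySem.List.index?_isSome_iff cl "@").2 hmem)
        have hval : (PySem.List.pyGet? cl ((p : Int) + 1)).getD "" = pvValA cl := by
          simp only [pvValA, hp]
        simp only [pvLoopA, hx, hat, hp, hval]
        simp only [reduceIte]
        rw [hstep, ih (i+1) _ k (by omega) (by omega)]
        rw [hdrop, hat]
        rw [PySem.List.index?_cons_of_ne (cl.drop (i+1)) (by decide : ("@" : String) ≠ "!")]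
        cases hr : PySem.List.index? (cl.drop (i+1)) "!" with
        | none => simp
        | some r => simp [List.take_succ_cons]
      · simp only [pvLoopA, hx, hbang, hat]
        simp only [reduceIte]
        rw [hstep, ih (i+1) v k (by omega) (by omega)]
        rw [hdrop]
        rw [PySem.List.index?_cons_of_ne (cl.drop (i+1)) hbang]
        cases hr : PySem.List.index? (cl.drop (i+1)) "!" with
        | none =>
          have hat' : ¬("@" = cl[i]) := fun h => hat h.symm
          simp only [Option.map_none, List.mem_cons, hat', false_or]
        | some r =>
          have hat' : ¬("@" = cl[i]) := fun h => hat h.symm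
          simp only [Option.map_some, List.take_succ_cons, List.mem_cons, hat', false_or]

-- the first '@' of a prefix of cl is the first '@' of cl
theorem pvIndex_take (cl : List String) (q : Nat) (h : "@" ∈ cl.take q) :
    PySem.List.index? cl "@" = PySem.List.index? (cl.take q) "@" := by
  conv_lhs => rw [← List.take_append_drop q cl]
  exact PySem.List.index?_append_of_mem _ h

-- A's contains/insert then modify equals B's setdefault then modify
theorem pvDictPart (dict : List (String × List String)) (key value : String) :
    ((if (PySem.Dict.mk dict).contains key then PySem.Dict.mk dict
      else (PySem.Dict.mk dict).insert key []).modify key [] (fun l => l ++ [value])).items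
    = (((PySem.Dict.mk dict).setdefault key []).modify key [] (fun l => l ++ [value])).items := by
  by_cases hc : (PySem.Dict.mk dict).contains key = true
  · rw [if_pos hc, PySem.Dict.setdefault_of_contains _ _ hc]
  · rw [if_neg hc,
      PySem.Dict.setdefault_of_not_contains _ _ (Bool.eq_false_iff.mpr hc)]

-- unconditional equality of the two ports
theorem pvMain (dict : List (String × List String)) (cl : List String) :
    modify_dict dict cl = modify_dict_alt dict cl := by
  have hloop := pvLoopA_char cl 0 "" "" (Nat.zero_le _)
  simp only [List.drop_zero, Nat.cast_zero] at hloop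
  simp only [modify_dict, modify_dict_alt, hloop]
  cases hq : PySem.List.index? cl "!" with
  | some q =>
    have hqlt : q < cl.length := by
      obtain ⟨pre, suf, hcl, hlen, _⟩ := (PySem.List.index?_eq_some_iff cl "!" q).1 hq
      subst hcl; simp [← hlen]
    simp only [PySem.List.slice_to_natCast]
    have hkey : pvKeyA cl =
        (if ((q : Int)) < (cl.length : Int) then
          (if (PySem.List.pyGet? cl ((q : Int) + 1)).getD "" = "A" then "Attacked" else "Destroyed")
        else "") := by
      rw [if_pos (by exact_mod_cast hqlt)]
      simp only [pvKeyA, hq]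
    rw [hkey]
    by_cases hm : "@" ∈ cl.take q
    · simp only [if_pos hm]
      obtain ⟨pp, hpp⟩ := Option.isSome_iff_exists.1
        ((PySem.List.index?_isSome_iff (cl.take q) "@").2 hm)
      have : PySem.List.index? cl "@" = some pp := (pvIndex_take cl q hm).trans hpp
      simp only [pvValA, this, hpp, Option.getD_some]
      exact pvDictPart dict _ _
    · simp only [if_neg hm]
      exact pvDictPart dict _ _
  | none =>
    simp only [PySem.List.slice_to_natCast, List.take_length]
    rw [if_neg (by omega : ¬ ((cl.length : Int) < (cl.length : Int)))]
    by_cases hm : "@" ∈ cl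
    · simp only [if_pos hm]
      obtain ⟨pp, hpp⟩ := Option.isSome_iff_exists.1 ((PySem.List.index?_isSome_iff cl "@").2 hm)
      simp only [pvValA, hpp, Option.getD_some]
      exact pvDictPart dict _ _
    · simp only [if_neg hm]
      exact pvDictPart dict _ _

-- ===== VERDICT (by name: the statement is the Claim_ definition above) =====
theorem modify_dict_spec : Claim_equal_modify_dict := by
  intro dict code_list _hdom _hpre
  exact pvMain dict code_list
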